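-- pv_equiv track=rewrite | github.com/Spookiel/British-Informatics-Olympiad-Solutions | Code/2014/Q3 - Increasing passwords.py | build
-- ===== SOURCE A (Python) =====
-- from math import comb
--
-- alpha = "ABCDEFGHIJKLMNOPQRSTUVWXYZ0123456789"
--
-- def build(n, targetLen, ans=""):
--     if targetLen == 0:
--         return ans
--     start = (alpha.index(ans[-1]) + 1) if ans else 0
--     for letter in range(start, 36):
--
--         can = comb(36 - (letter + 1), targetLen - 1)
--
--         if can >= n:
--             return build(n, targetLen - 1, ans + alpha[letter])
--         n -= can
-- ===== SOURCE B (Python) =====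
-- from math import comb
--
-- alpha = "ABCDEFGHIJKLMNOPQRSTUVWXYZ0123456789"
--
-- def build(n, targetLen, ans=""):
--     out = ans
--     if targetLen <= 0:
--         return out
--     start = (alpha.index(ans[-1]) + 1) if ans else 0
--     c = 36 - start          # letters still available
--     k = targetLen           # letters still to pick
--     t = comb(c, k)          # passwords completable from this state (the only comb call)
--     while k > 0:
--         can = t * k // c    # = comb(c-1, k-1), updated incrementally
--         if can >= n:
--             out += alpha[36 - c]
--             t = can
--             k -= 1
--         else:
--             n -= can
--             t -= can        # = comb(c-1, k)
--         c -= 1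
--     return out
-- ===== Notes on version B (the rewrite author's own statement) =====
-- stated objective: alternative
-- what changed: Replaces the tail recursion (one comb call per candidate letter) by a single iterative loop that calls comb once and thereafter maintains the remaining-passwords count t incrementally via exact integer arithmetic (t*k//c and t-can).
-- outside the precondition, e.g. on build(1000, 2, ''): A returns None, B raises ZeroDivisionError; on build(2, 1, '9'): A returns None, B raises ZeroDivisionError
import Mathlib
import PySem

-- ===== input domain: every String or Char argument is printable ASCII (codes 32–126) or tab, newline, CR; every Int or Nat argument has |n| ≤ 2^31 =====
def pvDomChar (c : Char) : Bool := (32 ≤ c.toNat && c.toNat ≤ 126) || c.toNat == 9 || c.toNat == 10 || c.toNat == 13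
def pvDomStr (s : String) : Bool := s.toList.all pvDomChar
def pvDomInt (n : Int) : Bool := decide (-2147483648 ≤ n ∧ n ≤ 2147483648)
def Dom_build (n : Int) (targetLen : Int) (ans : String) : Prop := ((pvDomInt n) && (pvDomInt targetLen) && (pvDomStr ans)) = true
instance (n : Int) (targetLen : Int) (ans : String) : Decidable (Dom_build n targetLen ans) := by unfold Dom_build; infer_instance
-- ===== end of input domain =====

-- B replaces A's tail recursion (one comb call per candidate letter) by one iterative loop
-- that calls comb once and maintains the remaining-count t incrementally (alternative, not claimed faster).

-- ===== PORT A =====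
def alphaS : String := "ABCDEFGHIJKLMNOPQRSTUVWXYZ0123456789"

-- math.comb: raises ValueError on negative arguments (those inputs are outside Pre_); guarded to 0 for totality
def pyComb (a b : Int) : Int :=
  if 0 ≤ a ∧ 0 ≤ b then
    if a < b then 0
    else ((Nat.descFactorial a.toNat b.toNat / Nat.factorial b.toNat : Nat) : Int)
  else 0

-- start = (alpha.index(ans[-1]) + 1) if ans else 0 ; str.index raising ValueError (char absent)
-- is outside Pre_ (idxOf then yields 36, so start = 37, which Pre_ excludes)
def startOf (ans : String) : Int :=
  match PySem.Str.pyGet? ans (-1) with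
  | some ch => ((List.idxOf ch alphaS.toList : Nat) : Int) + 1
  | none => 0

mutual
-- build for targetLen = k ≥ 0 (Python's `if targetLen == 0: return ans` is the k = 0 case)
def buildNat : Nat → Int → String → String
  | 0, _, ans => ans
  | (k+1), n, ans =>
      scanA k n (36 - startOf ans).toNat (startOf ans) ans
  termination_by k _ _ => (k, 0)
-- the `for letter in range(start, 36)` loop; fuel = letters left; `can` is written out twice;
-- falling off the loop returns "" standing for Python's implicit None (outside Pre_)
def scanA : Nat → Int → Nat → Int → String → String
  | _, _, 0, _, _ => ""
  | k, n, (fuel+1), letter, ans =>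
      if pyComb (36 - (letter + 1)) (k : Int) ≥ n then
        buildNat k n (ans.push ((PySem.Str.pyGet? alphaS letter).getD ' '))
      else scanA k (n - pyComb (36 - (letter + 1)) (k : Int)) fuel (letter + 1) ans
  termination_by k _ fuel _ _ => (k, fuel + 1)
end

def build (n : Int) (targetLen : Int) (ans : String) : String :=
  if targetLen = 0 then ans
  else if targetLen < 0 then ""   -- Python raises ValueError (comb) or returns None here; outside Pre_
  else buildNat targetLen.toNat n ans

-- ===== PORT B =====
-- the while-loop of Source B, state (c, k, n, t, out); `can = t*k//c` is written out in each use;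
-- c ≤ 0 with k > 0 is Python's ZeroDivisionError (outside Pre_), guarded for totality
def altGo (c : Int) (k : Int) (n : Int) (t : Int) (out : String) : String :=
  if k ≤ 0 then out
  else if c ≤ 0 then out
  else if PySem.Int.floordiv (t * k) c ≥ n then
    altGo (c - 1) (k - 1) n (PySem.Int.floordiv (t * k) c)
      (out.push ((PySem.Str.pyGet? alphaS (36 - c)).getD ' '))
  else altGo (c - 1) k (n - PySem.Int.floordiv (t * k) c) (t - PySem.Int.floordiv (t * k) c) out
termination_by c.toNat
decreasing_by all_goals omega

def build_alt (n : Int) (targetLen : Int) (ans : String) : String :=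
  if targetLen ≤ 0 then ans
  else altGo (36 - startOf ans) targetLen n (pyComb (36 - startOf ans) targetLen) ans

-- ===== PRECONDITION & SPEC =====
-- Pre_: exactly the inputs on which the Python A returns a string: targetLen = 0, or targetLen ≥ 1
-- with a valid rank (1 ≤ n ≤ comb(36-start, targetLen)), or n ≤ 0 with enough letters left
-- (start + targetLen ≤ 36); on all other inputs A raises or falls off the loop returning None.
def Pre_build (n : Int) (targetLen : Int) (ans : String) : Prop :=
  targetLen = 0 ∨ (1 ≤ targetLen ∧
    ((1 ≤ n ∧ n ≤ pyComb (36 - startOf ans) targetLen) ∨ (n ≤ 0 ∧ startOf ans + targetLen ≤ 36)))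
instance (n : Int) (targetLen : Int) (ans : String) : Decidable (Pre_build n targetLen ans) := by
  unfold Pre_build; infer_instance

def pvWitness_build : Int × Int × String := (7, 3, "")

def Spec_build (n : Int) (targetLen : Int) (ans : String) (out : String) : Prop := out = build_alt n targetLen ans
instance (n : Int) (targetLen : Int) (ans : String) (out : String) : Decidable (Spec_build n targetLen ans out) := by unfold Spec_build; infer_instance

-- ===== CLAIM (what is proved, stated in full; the proofs are below) =====
def Claim_equal_build : Prop := ∀ (n : Int) (targetLen : Int) (ans : String), Dom_build n targetLen ans → Pre_build n targetLen ans → Spec_build n targetLen ans (build n targetLen ans)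

-- ===== LEMMAS AND PROOFS =====

-- the loop invariant tying A's level (k picks left, c letters available, rank n) to B's state
def LoopInv (k c n : Int) : Prop :=
  (1 ≤ n ∧ n ≤ pyComb c k) ∨ (n ≤ 0 ∧ k ≤ c)

-- pyComb computes the binomial coefficient (math.comb)
lemma pyComb_eq_choose (a b : Int) :
    pyComb a b = if 0 ≤ a ∧ 0 ≤ b then ((Nat.choose a.toNat b.toNat : Nat) : Int) else 0 := by
  unfold pyComb
  by_cases h1 : 0 ≤ a ∧ 0 ≤ b
  · rw [if_pos h1, if_pos h1]
    by_cases h2 : a < b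
    · rw [if_pos h2, Nat.choose_eq_zero_of_lt (by omega)]
      rfl
    · rw [if_neg h2, Nat.choose_eq_descFactorial_div_factorial]
  · rw [if_neg h1, if_neg h1]

lemma pyComb_nonneg (a b : Int) : 0 ≤ pyComb a b := by
  rw [pyComb_eq_choose]; split <;> positivity

lemma startOf_nonneg (ans : String) : 0 ≤ startOf ans := by
  unfold startOf; split <;> positivity

lemma pyComb_nonpos (c k : Int) (hc : c ≤ 0) (hk : 1 ≤ k) : pyComb c k = 0 := by
  rw [pyComb_eq_choose]
  split
  · rename_i h
    have hc0 : c.toNat = 0 := by omega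
    rw [hc0, Nat.choose_eq_zero_of_lt (by omega)]
    rfl
  · rfl

-- alpha's characters are distinct: pushing alpha[letter] makes the next start letter+1
lemma startOf_push (ans : String) (letter : Int) (h0 : 0 ≤ letter) (h1 : letter < 36) :
    startOf (ans.push ((PySem.Str.pyGet? alphaS letter).getD ' ')) = letter + 1 := by
  unfold startOf
  have hpush : (ans.push ((PySem.Str.pyGet? alphaS letter).getD ' ')).toList
      = ans.toList ++ [((PySem.Str.pyGet? alphaS letter).getD ' ')] := by
    simp
  rw [show PySem.Str.pyGet? (ans.push ((PySem.Str.pyGet? alphaS letter).getD ' ')) (-1)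
      = PySem.List.pyGet? ((ans.push ((PySem.Str.pyGet? alphaS letter).getD ' ')).toList) (-1) from rfl,
    hpush, PySem.List.pyGet?_neg_one_append_singleton]
  have key : ∀ i : Nat, i < 36 →
      (List.idxOf ((PySem.Str.pyGet? alphaS (i : Int)).getD ' ') alphaS.toList : Int) = i := by decide
  have h := key letter.toNat (by omega)
  rw [show (letter.toNat : Int) = letter from by omega] at h
  show ((List.idxOf ((PySem.Str.pyGet? alphaS letter).getD ' ') alphaS.toList : Nat) : Int) + 1 = letter + 1
  omega

-- B's incremental step equals A's per-letter comb: comb(c,k+1)*(k+1) // c = comb(c-1,k)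
lemma can_eq (c k : Int) (hc : 1 ≤ c) (hk : 0 ≤ k) :
    PySem.Int.floordiv (pyComb c (k + 1) * (k + 1)) c = pyComb (c - 1) k := by
  obtain ⟨m, rfl⟩ : ∃ m : Nat, c = (m : Int) + 1 := ⟨(c - 1).toNat, by omega⟩
  obtain ⟨j, rfl⟩ : ∃ j : Nat, k = (j : Int) := ⟨k.toNat, by omega⟩
  have key : Nat.choose (m + 1) (j + 1) * (j + 1) = (m + 1) * Nat.choose m j := by
    have h := Nat.add_one_mul_choose_eq m j
    omega
  simp only [pyComb_eq_choose]
  rw [if_pos ⟨by positivity, by positivity⟩, if_pos ⟨by omega, by omega⟩]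
  rw [show ((m : Int) + 1).toNat = m + 1 from by omega, show ((j : Int) + 1).toNat = j + 1 from by omega,
    show ((m : Int) + 1 - 1).toNat = m from by omega, show ((j : Int)).toNat = j from by omega]
  rw [show ((Nat.choose (m + 1) (j + 1) : Nat) : Int) * ((j : Int) + 1)
      = ((Nat.choose (m + 1) (j + 1) * (j + 1) : Nat) : Int) from by push_cast; ring, key]
  rw [PySem.Int.floordiv_eq_ediv_of_pos (by omega)]
  push_cast
  rw [Int.mul_ediv_cancel_left _ (by omega)]

-- Pascal: comb(c,k+1) - comb(c-1,k) = comb(c-1,k+1)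
lemma pascal (c k : Int) (hc : 1 ≤ c) (hk : 0 ≤ k) :
    pyComb c (k + 1) - pyComb (c - 1) k = pyComb (c - 1) (k + 1) := by
  obtain ⟨m, rfl⟩ : ∃ m : Nat, c = (m : Int) + 1 := ⟨(c - 1).toNat, by omega⟩
  obtain ⟨j, rfl⟩ : ∃ j : Nat, k = (j : Int) := ⟨k.toNat, by omega⟩
  simp only [pyComb_eq_choose]
  rw [if_pos ⟨by positivity, by positivity⟩, if_pos ⟨by omega, by omega⟩, if_pos ⟨by omega, by positivity⟩]
  rw [show ((m : Int) + 1).toNat = m + 1 from by omega, show ((j : Int) + 1).toNat = j + 1 from by omega,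
    show ((m : Int) + 1 - 1).toNat = m from by omega, show ((j : Int)).toNat = j from by omega]
  have h := Nat.choose_succ_succ m j
  simp only [Nat.succ_eq_add_one] at h
  omega

-- one unfolding step of B's loop when it really runs
lemma altGo_step (c k n t : Int) (out : String) (hk : 0 < k) (hc : 0 < c) :
    altGo c k n t out =
      if PySem.Int.floordiv (t * k) c ≥ n then
        altGo (c - 1) (k - 1) n (PySem.Int.floordiv (t * k) c)
          (out.push ((PySem.Str.pyGet? alphaS (36 - c)).getD ' '))
      else altGo (c - 1) k (n - PySem.Int.floordiv (t * k) c) (t - PySem.Int.floordiv (t * k) c) out := by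
  rw [altGo]
  rw [if_neg (show ¬ k ≤ 0 by omega), if_neg (show ¬ c ≤ 0 by omega)]

lemma altGo_zero (c n t : Int) (out : String) : altGo c 0 n t out = out := by
  rw [altGo]
  simp

-- the two loops compute the same string, level by level
lemma level_eq : ∀ (k : Nat) (n : Int) (ans : String), LoopInv (k : Int) (36 - startOf ans) n →
    buildNat k n ans = altGo (36 - startOf ans) (k : Int) n (pyComb (36 - startOf ans) (k : Int)) ans := by
  intro k
  induction k with
  | zero =>
      intro n ans _
      rw [buildNat]
      exact (altGo_zero _ _ _ _).symm
  | succ k IH =>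
      intro n ans hInv
      have hs := startOf_nonneg ans
      have hcpos : 1 ≤ 36 - startOf ans := by
        rcases hInv with ⟨hn1, hn2⟩ | ⟨hn, hk⟩
        · by_contra h
          rw [pyComb_nonpos _ _ (by omega) (by push_cast; omega)] at hn2
          omega
        · push_cast at hk; omega
      -- the inner scan: both loops agree step by step
      have scan : ∀ (fuel : Nat) (n : Int) (ans : String), fuel ≤ 36 →
          LoopInv ((k : Int) + 1) (fuel : Int) n →
          scanA k n fuel (36 - (fuel : Int)) ans
            = altGo (fuel : Int) ((k : Int) + 1) n (pyComb (fuel : Int) ((k : Int) + 1)) ans := by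
        intro fuel
        induction fuel with
        | zero =>
            intro n ans _ hI
            exfalso
            rcases hI with ⟨h1, h2⟩ | ⟨h1, h2⟩
            · rw [pyComb_nonpos _ _ (by omega) (by omega)] at h2; omega
            · omega
        | succ f IHf =>
            intro n ans hle hI
            have hf1 : ((f + 1 : Nat) : Int) = (f : Int) + 1 := by push_cast; ring
            rw [hf1] at hI ⊢
            rw [scanA, altGo_step _ _ _ _ _ (by omega) (by omega),
              can_eq ((f : Int) + 1) (k : Int) (by omega) (by omega)]
            rw [show 36 - (36 - ((f : Int) + 1) + 1) = ((f : Int) + 1) - 1 from by ring,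
              show ((f : Int) + 1) - 1 = (f : Int) from by ring]
            have hcann := pyComb_nonneg (f : Int) (k : Int)
            by_cases hbr : pyComb (f : Int) (k : Int) ≥ n
            · rw [if_pos hbr, if_pos hbr]
              have hstart := startOf_push ans (36 - ((f : Int) + 1)) (by omega) (by omega)
              have hso : 36 - startOf (ans.push ((PySem.Str.pyGet? alphaS (36 - ((f : Int) + 1))).getD ' '))
                  = (f : Int) := by rw [hstart]; ring
              have hInv' : LoopInv (k : Int)
                  (36 - startOf (ans.push ((PySem.Str.pyGet? alphaS (36 - ((f : Int) + 1))).getD ' '))) n := by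
                rw [hso]
                rcases hI with ⟨h1, _⟩ | ⟨h1, h2⟩
                · exact Or.inl ⟨h1, hbr⟩
                · exact Or.inr ⟨h1, by omega⟩
              have hrec := IH n _ hInv'
              rw [hso] at hrec
              rw [show (k : Int) + 1 - 1 = (k : Int) from by ring, hrec]
            · rw [if_neg hbr, if_neg hbr]
              have hn1 : 1 ≤ n - pyComb (f : Int) (k : Int) := by
                rcases hI with ⟨h1, _⟩ | ⟨h1, _⟩ <;> omega
              have ht : pyComb ((f : Int) + 1) ((k : Int) + 1) - pyComb (f : Int) (k : Int)
                  = pyComb (f : Int) ((k : Int) + 1) := by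
                have h := pascal ((f : Int) + 1) (k : Int) (by omega) (by omega)
                rw [show ((f : Int) + 1) - 1 = (f : Int) from by ring] at h
                omega
              have hI' : LoopInv ((k : Int) + 1) ((f : Nat) : Int) (n - pyComb (f : Int) (k : Int)) := by
                left
                refine ⟨hn1, ?_⟩
                rcases hI with ⟨_, h2⟩ | ⟨h1, _⟩ <;> omega
              have hrec := IHf (n - pyComb (f : Int) (k : Int)) ans (by omega) hI'
              rw [show 36 - ((f : Int) + 1) + 1 = 36 - (f : Int) from by ring, ht]
              exact hrec
      -- put the level together
      rw [buildNat]
      have hfc : (((36 - startOf ans).toNat : Nat) : Int) = 36 - startOf ans := by omega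
      have hmain := scan (36 - startOf ans).toNat n ans (by omega)
        (by rw [hfc]; push_cast at hInv ⊢; exact hInv)
      rw [hfc] at hmain
      rw [show 36 - (36 - startOf ans) = startOf ans from by ring] at hmain
      rw [show (((k + 1 : Nat) : Nat) : Int) = (k : Int) + 1 from by push_cast; ring]
      exact hmain

-- ===== VERDICT (by name: the statement is the Claim_ definition above) =====
theorem build_spec : Claim_equal_build := by
  intro n targetLen ans _ hPre
  unfold Spec_build build build_alt
  rcases hPre with h0 | ⟨h1, hP⟩
  · subst h0; simp
  · rw [if_neg (show ¬ targetLen = 0 by omega), if_neg (show ¬ targetLen < 0 by omega),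
      if_neg (show ¬ targetLen ≤ 0 by omega)]
    have hcast : ((targetLen.toNat : Nat) : Int) = targetLen := by omega
    have hInv : LoopInv (targetLen.toNat : Int) (36 - startOf ans) n := by
      rw [hcast]
      rcases hP with ⟨a, b⟩ | ⟨a, b⟩
      · exact Or.inl ⟨a, b⟩
      · exact Or.inr ⟨a, by omega⟩
    have h := level_eq targetLen.toNat n ans hInv
    rw [hcast] at h
    exact h
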